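-- pv_equiv track=rewrite | github.com/godfredO/dsa | boostingProcessing.py | findMaximumSustainableClusterSize
-- ===== SOURCE A (Python) =====
-- def findMaximumSustainableClusterSize(processingPower, bootingPower, powerMax):
--     numOfProcessors = len(bootingPower)
--
--     maxNumber = 0
--     for i in range(numOfProcessors):  # consider all clusters
--         for j in range(i, numOfProcessors):
--
--             clusterSize = j - i + 1
--
--             maxBoost = 0
--             k = i
--             while k <= j:  # for k in range(i,j+1)
--                 maxBoost = max(maxBoost, bootingPower[k])
--                 k += 1
--
--             # for l in range(i,j+1) ; a single for loop for maxBoost and processingSum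
--             processingSum = 0
--             l = i
--             while l <= j:
--                 processingSum += processingPower[l]
--                 l += 1
--
--             consumption = maxBoost + (processingSum * clusterSize)
--             if consumption <= powerMax:
--                 maxNumber = max(maxNumber, clusterSize)
--
--     return maxNumber
-- ===== SOURCE B (Python) =====
-- def findMaximumSustainableClusterSize(processingPower, bootingPower, powerMax):
--     n = len(bootingPower)
--     best = 0
--     for i in range(n):
--         maxBoost = 0
--         total = 0
--         for j in range(i, n):
--             b = bootingPower[j]
--             if b > maxBoost:
--                 maxBoost = b
--             total += processingPower[j]
--             size = j - i + 1
--             if maxBoost + total * size <= powerMax and size > best: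
--                 best = size
--     return best
-- ===== Notes on version B (the rewrite author's own statement) =====
-- stated objective: faster
-- what changed: B extends each window incrementally, maintaining the running max boost and running processing sum while j grows, so the two inner while-loop rescans of A disappear: O(n^2) instead of O(n^3).
import Mathlib
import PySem

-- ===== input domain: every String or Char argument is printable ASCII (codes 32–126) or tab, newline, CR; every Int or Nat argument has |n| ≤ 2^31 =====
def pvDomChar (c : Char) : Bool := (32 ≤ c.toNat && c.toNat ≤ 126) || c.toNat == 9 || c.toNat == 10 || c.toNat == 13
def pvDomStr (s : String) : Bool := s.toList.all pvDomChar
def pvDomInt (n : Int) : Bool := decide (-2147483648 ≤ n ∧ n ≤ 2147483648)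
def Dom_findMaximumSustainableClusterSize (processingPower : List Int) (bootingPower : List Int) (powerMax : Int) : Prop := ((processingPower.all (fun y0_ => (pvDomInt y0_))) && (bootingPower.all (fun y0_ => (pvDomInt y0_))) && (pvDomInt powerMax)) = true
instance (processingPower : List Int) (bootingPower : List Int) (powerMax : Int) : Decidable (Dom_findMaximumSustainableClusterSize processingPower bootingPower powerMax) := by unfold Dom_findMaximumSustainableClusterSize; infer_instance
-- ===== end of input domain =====

-- B replaces A's per-window rescans by incrementally maintained running max/sum (O(n^2) vs O(n^3)).

-- ===== PORT A =====
-- while k <= j: maxBoost = max(maxBoost, bootingPower[k]); k += 1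
def pvWhileBoost (bp : List Int) (k j : Int) (acc : Int) : Int :=
  if k ≤ j then pvWhileBoost bp (k + 1) j (max acc (PySem.List.pyGetD bp k 0)) else acc
termination_by (j + 1 - k).toNat
decreasing_by omega

-- while l <= j: processingSum += processingPower[l]; l += 1
def pvWhileSum (pp : List Int) (l j : Int) (acc : Int) : Int :=
  if l ≤ j then pvWhileSum pp (l + 1) j (acc + PySem.List.pyGetD pp l 0) else acc
termination_by (j + 1 - l).toNat
decreasing_by omega

def findMaximumSustainableClusterSize (processingPower : List Int) (bootingPower : List Int) (powerMax : Int) : Int :=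
  let numOfProcessors : Int := bootingPower.length
  (PySem.List.pyRange 0 numOfProcessors 1).foldl (fun maxNumber i =>
    (PySem.List.pyRange i numOfProcessors 1).foldl (fun maxNumber j =>
      let clusterSize := j - i + 1
      let maxBoost := pvWhileBoost bootingPower i j 0
      let processingSum := pvWhileSum processingPower i j 0
      let consumption := maxBoost + processingSum * clusterSize
      if consumption ≤ powerMax then max maxNumber clusterSize else maxNumber) maxNumber) 0

-- ===== PORT B =====
def findMaximumSustainableClusterSize_alt (processingPower : List Int) (bootingPower : List Int) (powerMax : Int) : Int :=
  let n : Int := bootingPower.length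
  (PySem.List.pyRange 0 n 1).foldl (fun best i =>
    ((PySem.List.pyRange i n 1).foldl (fun st j =>
      let b := PySem.List.pyGetD bootingPower j 0
      let maxBoost := if b > st.1 then b else st.1
      let total := st.2.1 + PySem.List.pyGetD processingPower j 0
      let size := j - i + 1
      let best' := if maxBoost + total * size ≤ powerMax ∧ size > st.2.2 then size else st.2.2
      (maxBoost, total, best')) ((0 : Int), (0 : Int), best)).2.2) 0

-- ===== PRECONDITION & SPEC =====
-- Pre_ excludes exactly the inputs on which Python A raises IndexError:
-- bootingPower longer than processingPower (the sum loop reads past processingPower's end).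
def Pre_findMaximumSustainableClusterSize (processingPower : List Int) (bootingPower : List Int) (powerMax : Int) : Prop :=
  bootingPower.length ≤ processingPower.length
instance (processingPower : List Int) (bootingPower : List Int) (powerMax : Int) : Decidable (Pre_findMaximumSustainableClusterSize processingPower bootingPower powerMax) := by unfold Pre_findMaximumSustainableClusterSize; infer_instance

def pvWitness_findMaximumSustainableClusterSize : List Int × List Int × Int := ([1, 2, 3], [2, 1, 4], 20)

def Spec_findMaximumSustainableClusterSize (processingPower : List Int) (bootingPower : List Int) (powerMax : Int) (out : Int) : Prop := out = findMaximumSustainableClusterSize_alt processingPower bootingPower powerMax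
instance (processingPower : List Int) (bootingPower : List Int) (powerMax : Int) (out : Int) : Decidable (Spec_findMaximumSustainableClusterSize processingPower bootingPower powerMax out) := by unfold Spec_findMaximumSustainableClusterSize; infer_instance

-- ===== CLAIM (what is proved, stated in full; the proofs are below) =====
def Claim_equal_findMaximumSustainableClusterSize : Prop := ∀ (processingPower : List Int) (bootingPower : List Int) (powerMax : Int), Dom_findMaximumSustainableClusterSize processingPower bootingPower powerMax → Pre_findMaximumSustainableClusterSize processingPower bootingPower powerMax → Spec_findMaximumSustainableClusterSize processingPower bootingPower powerMax (findMaximumSustainableClusterSize processingPower bootingPower powerMax)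

-- ===== LEMMAS AND PROOFS =====

-- the while-loops as folds over a range
theorem pvWhileBoost_eq (bp : List Int) : ∀ (c : Nat) (k j acc : Int), (j + 1 - k).toNat = c →
    pvWhileBoost bp k j acc = (PySem.List.pyRange k (j + 1) 1).foldl (fun a t => max a (PySem.List.pyGetD bp t 0)) acc := by
  intro c
  induction c with
  | zero =>
    intro k j acc h
    rw [pvWhileBoost, if_neg (by omega), PySem.List.pyRange_one_eq_nil (by omega)]
    rfl
  | succ m ih =>
    intro k j acc h
    rw [pvWhileBoost, if_pos (by omega), PySem.List.pyRange_one_cons (by omega)]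
    simp only [List.foldl_cons]
    exact ih (k + 1) j _ (by omega)

theorem pvWhileSum_eq (pp : List Int) : ∀ (c : Nat) (l j acc : Int), (j + 1 - l).toNat = c →
    pvWhileSum pp l j acc = (PySem.List.pyRange l (j + 1) 1).foldl (fun a t => a + PySem.List.pyGetD pp t 0) acc := by
  intro c
  induction c with
  | zero =>
    intro l j acc h
    rw [pvWhileSum, if_neg (by omega), PySem.List.pyRange_one_eq_nil (by omega)]
    rfl
  | succ m ih =>
    intro l j acc h
    rw [pvWhileSum, if_pos (by omega), PySem.List.pyRange_one_cons (by omega)]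
    simp only [List.foldl_cons]
    exact ih (l + 1) j _ (by omega)

-- one-step extension of the window
theorem pvWhileBoost_succ (bp : List Int) (i j : Int) (h : i ≤ j) :
    pvWhileBoost bp i j 0 = max (pvWhileBoost bp i (j - 1) 0) (PySem.List.pyGetD bp j 0) := by
  rw [pvWhileBoost_eq bp _ i j 0 rfl, pvWhileBoost_eq bp _ i (j - 1) 0 rfl]
  have : (j - 1) + 1 = j := by omega
  rw [this, PySem.List.pyRange_one_succ_right (by omega), List.foldl_append]
  rfl

theorem pvWhileSum_succ (pp : List Int) (i j : Int) (h : i ≤ j) :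
    pvWhileSum pp i j 0 = pvWhileSum pp i (j - 1) 0 + PySem.List.pyGetD pp j 0 := by
  rw [pvWhileSum_eq pp _ i j 0 rfl, pvWhileSum_eq pp _ i (j - 1) 0 rfl]
  have : (j - 1) + 1 = j := by omega
  rw [this, PySem.List.pyRange_one_succ_right (by omega), List.foldl_append]
  rfl

theorem pvWhileBoost_empty (bp : List Int) (i : Int) : pvWhileBoost bp i (i - 1) 0 = 0 := by
  rw [pvWhileBoost, if_neg (by omega)]

theorem pvWhileSum_empty (pp : List Int) (i : Int) : pvWhileSum pp i (i - 1) 0 = 0 := by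
  rw [pvWhileSum, if_neg (by omega)]

-- the incremental inner loop of B computes the same value as A's rescan-per-window inner loop
theorem pvInnerEq (pp bp : List Int) (pm n i : Int) : ∀ (c : Nat) (j m : Int), i ≤ j → (n - j).toNat = c →
    ((PySem.List.pyRange j n 1).foldl (fun st j' =>
        let b := PySem.List.pyGetD bp j' 0
        let maxBoost := if b > st.1 then b else st.1
        let total := st.2.1 + PySem.List.pyGetD pp j' 0
        let size := j' - i + 1
        let best' := if maxBoost + total * size ≤ pm ∧ size > st.2.2 then size else st.2.2
        (maxBoost, total, best'))
      (pvWhileBoost bp i (j - 1) 0, pvWhileSum pp i (j - 1) 0, m)).2.2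
    = (PySem.List.pyRange j n 1).foldl (fun maxNumber j' =>
        let clusterSize := j' - i + 1
        let maxBoost := pvWhileBoost bp i j' 0
        let processingSum := pvWhileSum pp i j' 0
        let consumption := maxBoost + processingSum * clusterSize
        if consumption ≤ pm then max maxNumber clusterSize else maxNumber) m := by
  intro c
  induction c with
  | zero =>
    intro j m hij h
    rw [PySem.List.pyRange_one_eq_nil (by omega)]
    rfl
  | succ cc ih =>
    intro j m hij h
    rw [PySem.List.pyRange_one_cons (by omega)]
    simp only [List.foldl_cons]
    have hb : (if PySem.List.pyGetD bp j 0 > pvWhileBoost bp i (j - 1) 0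
        then PySem.List.pyGetD bp j 0 else pvWhileBoost bp i (j - 1) 0) = pvWhileBoost bp i j 0 := by
      rw [pvWhileBoost_succ bp i j hij]
      rcases le_or_gt (PySem.List.pyGetD bp j 0) (pvWhileBoost bp i (j - 1) 0) with hle | hgt
      · rw [if_neg (by omega), max_eq_left hle]
      · rw [if_pos (by omega), max_eq_right (by omega)]
    have hs : pvWhileSum pp i (j - 1) 0 + PySem.List.pyGetD pp j 0 = pvWhileSum pp i j 0 :=
      (pvWhileSum_succ pp i j hij).symm
    have hm : (if pvWhileBoost bp i j 0 + pvWhileSum pp i j 0 * (j - i + 1) ≤ pm ∧ j - i + 1 > m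
        then j - i + 1 else m)
        = (if pvWhileBoost bp i j 0 + pvWhileSum pp i j 0 * (j - i + 1) ≤ pm
          then max m (j - i + 1) else m) := by
      by_cases hc : pvWhileBoost bp i j 0 + pvWhileSum pp i j 0 * (j - i + 1) ≤ pm
      · rcases le_or_gt (j - i + 1) m with hle | hgt
        · rw [if_neg (by omega), if_pos hc, max_eq_left hle]
        · rw [if_pos ⟨hc, hgt⟩, if_pos hc, max_eq_right (by omega)]
      · rw [if_neg (by omega), if_neg hc]
    simp only [hb, hs, hm]
    have hstep := ih (j + 1)
      (if pvWhileBoost bp i j 0 + pvWhileSum pp i j 0 * (j - i + 1) ≤ pm then max m (j - i + 1) else m)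
      (by omega) (by omega)
    simp only [show (j + 1 - 1 : Int) = j from by omega] at hstep
    exact hstep

-- ===== VERDICT (by name: the statement is the Claim_ definition above) =====
theorem findMaximumSustainableClusterSize_spec : Claim_equal_findMaximumSustainableClusterSize := by
  intro pp bp pm _ _
  unfold Spec_findMaximumSustainableClusterSize findMaximumSustainableClusterSize findMaximumSustainableClusterSize_alt
  simp only []
  congr 1
  funext best i
  rw [← pvInnerEq pp bp pm (bp.length : Int) i (bp.length - i).toNat i best le_rfl rfl,
      pvWhileBoost_empty, pvWhileSum_empty]
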